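-- pv_equiv track=rewrite | github.com/PaulC61/Cheminformatics | M1/Algo Prog/Exam Solutions/Exam2018.py | starsBandWhiteLoop
-- ===== SOURCE A (Python) =====
-- def starsBandWhiteLoop(lngth, pos, bandWdth):
--     starStrng = ""
--     for i in range (lngth):
--         if i >= pos and i < pos+bandWdth:
--             starStrng += " "
--         else:
--             starStrng += "*"
--     return starStrng
-- ===== SOURCE B (Python) =====
-- def starsBandWhiteLoop(lngth, pos, bandWdth):
--     n = max(0, lngth)
--     start = max(0, min(pos, n))
--     end = max(start, min(pos + bandWdth, n))
--     return "*" * start + " " * (end - start) + "*" * (n - end)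
-- ===== Notes on version B (the rewrite author's own statement) =====
-- stated objective: faster
-- what changed: Replaces the per-index loop with per-character branch-and-append by computing the clamped band bounds and concatenating three repeated segments ('*'*start + ' '*(end-start) + '*'*(rest)).
import Mathlib
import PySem

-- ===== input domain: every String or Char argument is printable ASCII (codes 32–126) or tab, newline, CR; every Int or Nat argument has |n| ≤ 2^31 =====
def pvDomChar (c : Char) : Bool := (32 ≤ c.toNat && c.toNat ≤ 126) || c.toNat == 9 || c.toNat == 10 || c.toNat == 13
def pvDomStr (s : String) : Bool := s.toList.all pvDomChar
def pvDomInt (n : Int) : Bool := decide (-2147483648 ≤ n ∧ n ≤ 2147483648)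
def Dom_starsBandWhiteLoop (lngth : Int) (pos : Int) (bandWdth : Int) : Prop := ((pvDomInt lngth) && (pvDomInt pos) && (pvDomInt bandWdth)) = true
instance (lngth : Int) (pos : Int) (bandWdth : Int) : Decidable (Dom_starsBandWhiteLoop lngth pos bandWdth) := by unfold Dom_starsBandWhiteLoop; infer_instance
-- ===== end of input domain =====

-- B replaces A's per-character branch-and-append loop by clamped-bound arithmetic and
-- three bulk-repeated segments (same result; measurably faster at large n).

-- ===== PORT A =====
def starsBandWhiteLoop (lngth : Int) (pos : Int) (bandWdth : Int) : String :=
  (PySem.List.pyRange 0 lngth 1).foldl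
    (fun starStrng i => if pos ≤ i ∧ i < pos + bandWdth then starStrng ++ " " else starStrng ++ "*")
    ""

-- ===== PORT B =====
def starsBandWhiteLoop_alt (lngth : Int) (pos : Int) (bandWdth : Int) : String :=
  let n := max 0 lngth
  let start := max 0 (min pos n)
  let e := max start (min (pos + bandWdth) n)
  String.ofList (List.replicate start.toNat '*')
    ++ String.ofList (List.replicate (e - start).toNat ' ')
    ++ String.ofList (List.replicate (n - e).toNat '*')

-- ===== PRECONDITION & SPEC =====
def Spec_starsBandWhiteLoop (lngth : Int) (pos : Int) (bandWdth : Int) (out : String) : Prop := out = starsBandWhiteLoop_alt lngth pos bandWdth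
instance (lngth : Int) (pos : Int) (bandWdth : Int) (out : String) : Decidable (Spec_starsBandWhiteLoop lngth pos bandWdth out) := by unfold Spec_starsBandWhiteLoop; infer_instance

-- ===== CLAIM (what is proved, stated in full; the proofs are below) =====
def Claim_equal_starsBandWhiteLoop : Prop := ∀ (lngth : Int) (pos : Int) (bandWdth : Int), Dom_starsBandWhiteLoop lngth pos bandWdth → Spec_starsBandWhiteLoop lngth pos bandWdth (starsBandWhiteLoop lngth pos bandWdth)

-- ===== LEMMAS AND PROOFS =====

-- A's loop appends one character per index: it builds the string of the map of the branch.
theorem foldl_char_append (P : Int → Prop) [DecidablePred P] (r : List Int) (acc : List Char) :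
    r.foldl (fun s i => if P i then s ++ " " else s ++ "*") (String.ofList acc)
      = String.ofList (acc ++ r.map (fun i => if P i then ' ' else '*')) := by
  induction r generalizing acc with
  | nil => simp
  | cons x t ih =>
    simp only [List.foldl_cons, List.map_cons]
    have hsp : String.ofList acc ++ " " = String.ofList (acc ++ [' ']) := by
      rw [String.ofList_append]
    have hst : String.ofList acc ++ "*" = String.ofList (acc ++ ['*']) := by
      rw [String.ofList_append]
    by_cases h : P x
    · rw [if_pos h, hsp, ih]; simp [h]
    · rw [if_neg h, hst, ih]; simp [h]

-- a segment of the range on which the branch is constant maps to a replicate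
theorem map_pyRange_const (f : Int → Char) (a b : Int) (c : Char)
    (h : ∀ i, a ≤ i → i < b → f i = c) :
    (PySem.List.pyRange a b 1).map f = List.replicate (b - a).toNat c := by
  rw [PySem.List.pyRange_one, List.map_map]
  rw [List.map_congr_left (g := fun _ => c) ?_]
  · simp [List.map_const']
  · intro k hk
    simp only [List.mem_range] at hk
    show f (a + (k : Int)) = c
    exact h _ (by omega) (by omega)

theorem starsBandWhiteLoop_eq (lngth pos bandWdth : Int) :
    starsBandWhiteLoop lngth pos bandWdth = starsBandWhiteLoop_alt lngth pos bandWdth := by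
  unfold starsBandWhiteLoop starsBandWhiteLoop_alt
  set n := max 0 lngth with hn
  set s := max 0 (min pos n) with hs
  set e := max s (min (pos + bandWdth) n) with he
  have hrange : PySem.List.pyRange 0 lngth 1 = PySem.List.pyRange 0 n 1 := by
    by_cases h : 0 ≤ lngth
    · rw [hn, max_eq_right h]
    · rw [PySem.List.pyRange_one_eq_nil (by omega),
        PySem.List.pyRange_one_eq_nil (by omega)]
  have hsplit : PySem.List.pyRange 0 n 1
      = PySem.List.pyRange 0 s 1 ++ (PySem.List.pyRange s e 1 ++ PySem.List.pyRange e n 1) := by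
    rw [← PySem.List.pyRange_one_append s e n (by omega) (by omega),
      ← PySem.List.pyRange_one_append 0 s n (by omega) (by omega)]
  have h0 : ("" : String) = String.ofList [] := rfl
  rw [hrange, h0, foldl_char_append (fun i => pos ≤ i ∧ i < pos + bandWdth), hsplit]
  rw [List.map_append, List.map_append]
  rw [map_pyRange_const _ 0 s '*' (fun i h1 h2 => by
        have : ¬ (pos ≤ i ∧ i < pos + bandWdth) := by omega
        simp [this]),
      map_pyRange_const _ s e ' ' (fun i h1 h2 => by
        have : pos ≤ i ∧ i < pos + bandWdth := by omega
        simp [this]),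
      map_pyRange_const _ e n '*' (fun i h1 h2 => by
        have : ¬ (pos ≤ i ∧ i < pos + bandWdth) := by omega
        simp [this])]
  show _ = String.ofList (List.replicate s.toNat '*')
      ++ String.ofList (List.replicate (e - s).toNat ' ')
      ++ String.ofList (List.replicate (n - e).toNat '*')
  rw [← String.ofList_append, ← String.ofList_append]
  congr 1
  simp

-- ===== VERDICT (by name: the statement is the Claim_ definition above) =====
theorem starsBandWhiteLoop_spec : Claim_equal_starsBandWhiteLoop := by
  intro lngth pos bandWdth _
  exact starsBandWhiteLoop_eq lngth pos bandWdth
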